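-- pv_equiv track=rewrite | github.com/ldobbelsteen/rubik | logic.py | list_centers
-- ===== SOURCE A (Python) =====
-- def cubie_type(n: int, x: int, y: int, z: int):
--     """Determine the type of a cubie by its coordinates. 0 = corner, 1 = center,
--     2 = edge and -1 = internal."""
--     if (x == 0 or x == n - 1) and (y == 0 or y == n - 1) and (z == 0 or z == n - 1):
--         return 0
--     if (
--         ((x == 0 or x == n - 1) and y > 0 and y < n - 1 and z > 0 and z < n - 1)
--         or ((y == 0 or y == n - 1) and x > 0 and x < n - 1 and z > 0 and z < n - 1)
--         or ((z == 0 or z == n - 1) and x > 0 and x < n - 1 and y > 0 and y < n - 1)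
--     ):
--         return 1
--     if x > 0 and x < n - 1 and y > 0 and y < n - 1 and z > 0 and z < n - 1:
--         return -1
--     return 2
--
-- def list_centers(n: int) -> list[tuple[int, int, int]]:
--     """Get a list of coordinates of the centers."""
--     return [
--         (x, y, z)
--         for x in range(n)
--         for y in range(n)
--         for z in range(n)
--         if cubie_type(n, x, y, z) == 1
--     ]
-- ===== SOURCE B (Python) =====
-- def list_centers(n: int) -> list[tuple[int, int, int]]:
--     """Get a list of coordinates of the centers."""
--     if n < 3:
--         return []
--     inner = range(1, n - 1)
--     out = []
--     # x = 0 face: whole interior square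
--     for y in inner:
--         for z in inner:
--             out.append((0, y, z))
--     # interior x slices: the square's border minus its corners
--     for x in inner:
--         for z in inner:
--             out.append((x, 0, z))
--         for y in inner:
--             out.append((x, y, 0))
--             out.append((x, y, n - 1))
--         for z in inner:
--             out.append((x, n - 1, z))
--     # x = n-1 face
--     for y in inner:
--         for z in inner:
--             out.append((n - 1, y, z))
--     return out
-- ===== Notes on version B (the rewrite author's own statement) =====
-- stated objective: faster
-- what changed: Instead of scanning all n^3 cubies and classifying each with cubie_type, B directly emits the six faces' center cubies (full interior square on the x=0 and x=n-1 faces, and the square border minus corners on each interior x-slice) in the same lexicographic order.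
import Mathlib
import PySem

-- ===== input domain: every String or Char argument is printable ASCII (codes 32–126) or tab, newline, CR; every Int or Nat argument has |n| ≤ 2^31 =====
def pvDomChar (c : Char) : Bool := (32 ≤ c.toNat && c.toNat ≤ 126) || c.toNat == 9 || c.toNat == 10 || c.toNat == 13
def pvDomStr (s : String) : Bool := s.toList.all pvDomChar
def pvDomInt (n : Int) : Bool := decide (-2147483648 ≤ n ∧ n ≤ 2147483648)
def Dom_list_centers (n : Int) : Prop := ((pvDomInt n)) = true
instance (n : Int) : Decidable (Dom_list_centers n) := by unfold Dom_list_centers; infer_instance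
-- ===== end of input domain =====

-- B replaces A's O(n^3) scan-and-classify with a direct O(n^2) enumeration of the six
-- faces' center cubies, emitted in the same lexicographic order.

-- ===== PORT A =====
def cubie_type (n x y z : Int) : Int :=
  if (x = 0 ∨ x = n - 1) ∧ (y = 0 ∨ y = n - 1) ∧ (z = 0 ∨ z = n - 1) then 0
  else if ((x = 0 ∨ x = n - 1) ∧ 0 < y ∧ y < n - 1 ∧ 0 < z ∧ z < n - 1)
        ∨ ((y = 0 ∨ y = n - 1) ∧ 0 < x ∧ x < n - 1 ∧ 0 < z ∧ z < n - 1)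
        ∨ ((z = 0 ∨ z = n - 1) ∧ 0 < x ∧ x < n - 1 ∧ 0 < y ∧ y < n - 1) then 1
  else if 0 < x ∧ x < n - 1 ∧ 0 < y ∧ y < n - 1 ∧ 0 < z ∧ z < n - 1 then -1
  else 2

def list_centers (n : Int) : List (Int × Int × Int) :=
  (PySem.List.pyRange 0 n 1).flatMap (fun x =>
    (PySem.List.pyRange 0 n 1).flatMap (fun y =>
      ((PySem.List.pyRange 0 n 1).filter (fun z => cubie_type n x y z == 1)).map
        (fun z => (x, y, z))))

-- ===== PORT B =====
-- Source B's `inner = range(1, n - 1)`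
def pvInner (n : Int) : List Int := PySem.List.pyRange 1 (n - 1) 1

def list_centers_alt (n : Int) : List (Int × Int × Int) :=
  if n < 3 then []
  else
    ((pvInner n).flatMap fun y => (pvInner n).map fun z => (0, y, z))
    ++ ((pvInner n).flatMap fun x =>
          ((pvInner n).map fun z => (x, 0, z))
          ++ ((pvInner n).flatMap fun y => [(x, y, 0), (x, y, n - 1)])
          ++ ((pvInner n).map fun z => (x, n - 1, z)))
    ++ ((pvInner n).flatMap fun y => (pvInner n).map fun z => (n - 1, y, z))

-- ===== PRECONDITION & SPEC =====
def Spec_list_centers (n : Int) (out : List (Int × Int × Int)) : Prop := out = list_centers_alt n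
instance (n : Int) (out : List (Int × Int × Int)) : Decidable (Spec_list_centers n out) := by unfold Spec_list_centers; infer_instance

-- ===== CLAIM (what is proved, stated in full; the proofs are below) =====
def Claim_equal_list_centers : Prop := ∀ (n : Int), Dom_list_centers n → Spec_list_centers n (list_centers n)

-- ===== LEMMAS AND PROOFS =====

-- one x-slice of A (proof-side abbreviation for A's two inner loops)
def pvSliceA (n x : Int) : List (Int × Int × Int) :=
  (PySem.List.pyRange 0 n 1).flatMap (fun y =>
    ((PySem.List.pyRange 0 n 1).filter (fun z => cubie_type n x y z == 1)).map
      (fun z => (x, y, z)))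

theorem pvListCentersEq (n : Int) :
    list_centers n = (PySem.List.pyRange 0 n 1).flatMap (pvSliceA n) := rfl

-- splitting the full range into first element, interior, last element
theorem pvRangeSplit {n : Int} (h : (3:Int) ≤ n) :
    PySem.List.pyRange 0 n 1 = 0 :: (pvInner n ++ [n - 1]) := by
  rw [PySem.List.pyRange_one_cons (by omega), show (0:Int) + 1 = 1 from by norm_num]
  rw [PySem.List.pyRange_one_append 1 (n - 1) n (by omega) (by omega)]
  have hs := PySem.List.pyRange_one_singleton (n - 1)
  rw [show n - 1 + 1 = n from by omega] at hs
  rw [hs, pvInner]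

-- z-rows of A: both x and y on the boundary → nothing kept
theorem pvRowEmpty {n x y : Int} (h : (3:Int) ≤ n)
    (hx : x = 0 ∨ x = n - 1) (hy : y = 0 ∨ y = n - 1) :
    (0 :: (pvInner n ++ [n - 1])).filter (fun z => cubie_type n x y z == 1) = [] := by
  rw [List.filter_eq_nil_iff]
  intro z hz
  simp only [pvInner, List.mem_cons, List.mem_append, PySem.List.mem_pyRange_one] at hz
  rw [beq_iff_eq]
  unfold cubie_type
  split_ifs <;> first | exact not_false | omega

-- boundary x, interior y: exactly the interior z's are kept
theorem pvRowFull {n x y : Int} (h : (3:Int) ≤ n)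
    (hx : x = 0 ∨ x = n - 1) (hy : 0 < y ∧ y < n - 1) :
    (0 :: (pvInner n ++ [n - 1])).filter (fun z => cubie_type n x y z == 1) = pvInner n := by
  rw [List.filter_cons, List.filter_append]
  have h0 : (cubie_type n x y 0 == 1) = false := by
    rw [beq_eq_false_iff_ne, ne_eq]; unfold cubie_type; split_ifs <;> first | exact not_false | omega
  have hl : (cubie_type n x y (n - 1) == 1) = false := by
    rw [beq_eq_false_iff_ne, ne_eq]; unfold cubie_type; split_ifs <;> first | exact not_false | omega
  have hm : (pvInner n).filter (fun z => cubie_type n x y z == 1) = pvInner n := by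
    rw [List.filter_eq_self]
    intro z hz
    simp only [pvInner, PySem.List.mem_pyRange_one] at hz
    rw [beq_iff_eq]; unfold cubie_type; split_ifs <;> first | exact not_false | omega
  simp [h0, hl, hm]

-- interior x, boundary y: exactly the interior z's are kept
theorem pvRowSide {n x y : Int} (h : (3:Int) ≤ n)
    (hx : 0 < x ∧ x < n - 1) (hy : y = 0 ∨ y = n - 1) :
    (0 :: (pvInner n ++ [n - 1])).filter (fun z => cubie_type n x y z == 1) = pvInner n := by
  rw [List.filter_cons, List.filter_append]
  have h0 : (cubie_type n x y 0 == 1) = false := by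
    rw [beq_eq_false_iff_ne, ne_eq]; unfold cubie_type; split_ifs <;> first | exact not_false | omega
  have hl : (cubie_type n x y (n - 1) == 1) = false := by
    rw [beq_eq_false_iff_ne, ne_eq]; unfold cubie_type; split_ifs <;> first | exact not_false | omega
  have hm : (pvInner n).filter (fun z => cubie_type n x y z == 1) = pvInner n := by
    rw [List.filter_eq_self]
    intro z hz
    simp only [pvInner, PySem.List.mem_pyRange_one] at hz
    rw [beq_iff_eq]; unfold cubie_type; split_ifs <;> first | exact not_false | omega
  simp [h0, hl, hm]

-- interior x, interior y: only the two boundary z's are kept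
theorem pvRowEnds {n x y : Int} (h : (3:Int) ≤ n)
    (hx : 0 < x ∧ x < n - 1) (hy : 0 < y ∧ y < n - 1) :
    (0 :: (pvInner n ++ [n - 1])).filter (fun z => cubie_type n x y z == 1) = [0, n - 1] := by
  rw [List.filter_cons, List.filter_append]
  have h0 : (cubie_type n x y 0 == 1) = true := by
    rw [beq_iff_eq]; unfold cubie_type; split_ifs <;> first | exact not_false | omega
  have hl : (cubie_type n x y (n - 1) == 1) = true := by
    rw [beq_iff_eq]; unfold cubie_type; split_ifs <;> first | exact not_false | omega
  have hm : (pvInner n).filter (fun z => cubie_type n x y z == 1) = [] := by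
    rw [List.filter_eq_nil_iff]
    intro z hz
    simp only [pvInner, PySem.List.mem_pyRange_one] at hz
    rw [beq_iff_eq]; unfold cubie_type; split_ifs <;> first | exact not_false | omega
  simp [h0, hl, hm]

-- boundary x slice of A equals a full interior square
theorem pvFace {n x : Int} (h : (3:Int) ≤ n) (hx : x = 0 ∨ x = n - 1) :
    pvSliceA n x = (pvInner n).flatMap (fun y => (pvInner n).map (fun z => (x, y, z))) := by
  unfold pvSliceA
  rw [pvRangeSplit h, List.flatMap_cons, List.flatMap_append]
  rw [pvRowEmpty h hx (Or.inl rfl)]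
  rw [List.flatMap_congr (fun y hy => by
    simp only [pvInner, PySem.List.mem_pyRange_one] at hy
    rw [pvRowFull h hx ⟨by omega, by omega⟩])]
  rw [show ([(n - 1)] : List Int).flatMap (fun y =>
        ((0 :: (pvInner n ++ [n - 1])).filter (fun z => cubie_type n x y z == 1)).map
          (fun z => (x, y, z))) = [] from by
    simp [pvRowEmpty h hx (Or.inr rfl)]]
  simp

-- interior x slice of A equals B's border-minus-corners slice
theorem pvSlice {n x : Int} (h : (3:Int) ≤ n) (hx : 0 < x ∧ x < n - 1) :
    pvSliceA n x =
      ((pvInner n).map fun z => (x, 0, z))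
      ++ ((pvInner n).flatMap fun y => [(x, y, 0), (x, y, n - 1)])
      ++ ((pvInner n).map fun z => (x, n - 1, z)) := by
  unfold pvSliceA
  rw [pvRangeSplit h, List.flatMap_cons, List.flatMap_append]
  rw [pvRowSide h hx (Or.inl rfl)]
  rw [List.flatMap_congr (fun y hy => by
    simp only [pvInner, PySem.List.mem_pyRange_one] at hy
    rw [pvRowEnds h hx ⟨by omega, by omega⟩])]
  rw [show ([(n - 1)] : List Int).flatMap (fun y =>
        ((0 :: (pvInner n ++ [n - 1])).filter (fun z => cubie_type n x y z == 1)).map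
          (fun z => (x, y, z))) =
      (pvInner n).map (fun z => (x, n - 1, z)) from by
    simp [pvRowSide h hx (Or.inr rfl)]]
  simp [List.append_assoc]

-- the middle slices, all at once
theorem pvMid {n : Int} (h : (3:Int) ≤ n) :
    (pvInner n).flatMap (pvSliceA n) =
      (pvInner n).flatMap (fun x =>
        ((pvInner n).map fun z => (x, 0, z))
        ++ ((pvInner n).flatMap fun y => [(x, y, 0), (x, y, n - 1)])
        ++ ((pvInner n).map fun z => (x, n - 1, z))) := by
  apply List.flatMap_congr
  intro x hx
  simp only [pvInner, PySem.List.mem_pyRange_one] at hx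
  exact pvSlice h ⟨by omega, by omega⟩

-- ===== VERDICT (by name: the statement is the Claim_ definition above) =====
theorem list_centers_spec : Claim_equal_list_centers := by
  intro n _
  unfold Spec_list_centers
  by_cases h3 : n < 3
  · rw [list_centers_alt, if_pos h3, pvListCentersEq]
    by_cases h0 : n < 1
    · rw [PySem.List.pyRange_one_eq_nil (by omega)]; simp
    · interval_cases n <;> decide
  · rw [list_centers_alt, if_neg h3, pvListCentersEq]
    have h : (3:Int) ≤ n := by omega
    rw [pvRangeSplit h, List.flatMap_cons, List.flatMap_append, List.flatMap_singleton]
    rw [pvFace h (Or.inl rfl), pvFace h (Or.inr rfl), pvMid h]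
    simp [List.append_assoc]
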